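-- pv_equiv track=rewrite | github.com/manoj-2305/SCT_ML_1 | app.py | format_in_indian_currency
-- ===== SOURCE A (Python) =====
-- def format_in_indian_currency(amount):
--     s = str(int(amount))
--     if len(s) <= 3:
--         return '₹' + s
--     else:
--         last3 = s[-3:]
--         rest = s[:-3]
--         new_rest = ""
--         while len(rest) > 2:
--             new_rest = ',' + rest[-2:] + new_rest
--             rest = rest[:-2]
--         new_rest = rest + new_rest
--         return '₹' + new_rest + ',' + last3
-- ===== SOURCE B (Python) =====
-- def format_in_indian_currency(amount):
--     # Build groups over the reversed digit string: first 3 chars, then 2 at a time.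
--     r = str(int(amount))[::-1]
--     parts = [r[:3]]
--     i = 3
--     while i < len(r):
--         parts.append(r[i:i + 2])
--         i += 2
--     return '\u20b9' + ','.join(parts)[::-1]
-- ===== Notes on version B (the rewrite author's own statement) =====
-- stated objective: alternative
-- what changed: Instead of A's while loop that repeatedly slices two characters off the right end of a shrinking prefix string and prepends them with a comma, B reverses the digit string once, walks it left-to-right collecting a three-char group then two-char groups into a list, joins with commas and reverses the result; the minus sign is handled uniformly as an ordinary character.
import Mathlib
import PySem

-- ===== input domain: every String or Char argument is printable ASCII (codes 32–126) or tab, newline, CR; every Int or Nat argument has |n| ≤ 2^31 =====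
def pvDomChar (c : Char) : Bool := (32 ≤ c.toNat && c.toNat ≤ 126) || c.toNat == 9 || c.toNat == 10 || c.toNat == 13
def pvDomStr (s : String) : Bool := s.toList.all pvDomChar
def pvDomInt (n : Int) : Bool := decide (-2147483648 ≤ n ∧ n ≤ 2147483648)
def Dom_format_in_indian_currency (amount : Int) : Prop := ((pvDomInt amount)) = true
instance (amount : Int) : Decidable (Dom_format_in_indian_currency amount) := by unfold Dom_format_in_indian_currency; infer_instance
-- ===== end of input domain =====

-- B builds the groups over the reversed digit string (first 3 chars, then 2 at a time)
-- and joins them, instead of A's repeated right-end slicing of a shrinking prefix;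
-- objective: alternative decomposition (same cost).


-- ===== PORT A =====
-- while len(rest) > 2: new_rest = ',' + rest[-2:] + new_rest; rest = rest[:-2]
def pvALoop (rest new_rest : List Char) : List Char :=
  if 2 < rest.length then
    pvALoop (PySem.List.slice rest none (some (-2)))
      (',' :: PySem.List.slice rest (some (-2)) none ++ new_rest)
  else rest ++ new_rest
termination_by rest.length
decreasing_by
  rw [PySem.List.slice_to_neg_ofNat rest 2 (by omega)]
  simp; omega

def format_in_indian_currency (amount : Int) : String :=
  let s := PySem.Int.toChars amount          -- str(int(amount)) as its characters
  if s.length ≤ 3 then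
    String.ofList ('₹' :: s)                     -- '₹' + s
  else
    let last3 := PySem.List.slice s (some (-3)) none   -- s[-3:]
    let rest := PySem.List.slice s none (some (-3))    -- s[:-3]
    let new_rest := pvALoop rest []
    String.ofList ('₹' :: (new_rest ++ ',' :: last3))      -- '₹' + new_rest + ',' + last3

-- ===== PORT B =====
-- while i < len(r): parts.append(r[i:i+2]); i += 2
def pvBLoop (r : List Char) (i : Nat) (parts : List (List Char)) : List (List Char) :=
  if i < r.length then
    pvBLoop r (i + 2) (parts ++ [PySem.List.slice r (some (i : Int)) (some ((i : Int) + 2))])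
  else parts
termination_by r.length - i

def format_in_indian_currency_alt (amount : Int) : String :=
  let r := (PySem.Int.toChars amount).reverse          -- str(int(amount))[::-1] (exact: slice?_none_none_neg_one)
  let parts := pvBLoop r 3 [PySem.List.slice r none (some 3)]   -- parts = [r[:3]]; loop
  String.ofList ('₹' :: (PySem.Chars.join [','] parts).reverse)     -- '₹' + ','.join(parts)[::-1]

-- ===== PRECONDITION & SPEC =====
def Spec_format_in_indian_currency (amount : Int) (out : String) : Prop := out = format_in_indian_currency_alt amount
instance (amount : Int) (out : String) : Decidable (Spec_format_in_indian_currency amount out) := by unfold Spec_format_in_indian_currency; infer_instance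

-- ===== CLAIM (what is proved, stated in full; the proofs are below) =====
def Claim_equal_format_in_indian_currency : Prop := ∀ (amount : Int), Dom_format_in_indian_currency amount → Spec_format_in_indian_currency amount (format_in_indian_currency amount)

-- ===== LEMMAS AND PROOFS =====

-- A's loop with the slices resolved, accumulator dropped: commas every 2 chars from the right.
def pvGroupRight (rest : List Char) : List Char :=
  if 2 < rest.length then
    pvGroupRight (rest.take (rest.length - 2)) ++ ',' :: rest.drop (rest.length - 2)
  else rest
termination_by rest.length
decreasing_by simp; omega

-- chunks of 2 from the front
def pvChunkF (t : List Char) : List (List Char) :=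
  if t.isEmpty then [] else t.take 2 :: pvChunkF (t.drop 2)
termination_by t.length
decreasing_by
  rename_i h
  simp [List.isEmpty_iff] at h
  have : 0 < t.length := List.length_pos_of_ne_nil h
  simp; omega

theorem pvALoop_eq (rest : List Char) : ∀ acc, pvALoop rest acc = pvGroupRight rest ++ acc := by
  induction rest using pvGroupRight.induct with
  | case1 rest h ih =>
    intro acc
    rw [pvALoop, pvGroupRight, if_pos h, if_pos h,
        PySem.List.slice_to_neg_ofNat rest 2 (by omega),
        PySem.List.slice_from_neg_ofNat rest 2 (by omega), ih]
    simp
  | case2 rest h =>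
    intro acc
    rw [pvALoop, pvGroupRight, if_neg h, if_neg h]

theorem pvChunkF_cons (t : List Char) (h : t ≠ []) :
    pvChunkF t = t.take 2 :: pvChunkF (t.drop 2) := by
  rw [pvChunkF, if_neg (by simpa [List.isEmpty_iff] using h)]

theorem pvChunkF_nil : pvChunkF [] = [] := by rw [pvChunkF]; rfl

theorem pvChunkF_ne_nil (t : List Char) (h : t ≠ []) : pvChunkF t ≠ [] := by
  rw [pvChunkF_cons t h]; simp

theorem pvBLoop_eq (r : List Char) (i : Nat) (parts : List (List Char)) :
    pvBLoop r i parts = parts ++ pvChunkF (r.drop i) := by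
  induction hi : r.length - i using Nat.strong_induction_on generalizing i parts with
  | _ n ih =>
  by_cases h : i < r.length
  · rw [pvBLoop, if_pos h]
    have hc : ((i : Int) + 2) = (((i + 2 : Nat)) : Int) := by push_cast; ring
    rw [hc, PySem.List.slice_natCast]
    have h2 : i + 2 - i = 2 := by omega
    rw [h2, ih (r.length - (i + 2)) (by omega) (i + 2) _ rfl]
    rw [pvChunkF_cons (r.drop i) (by simp; omega)]
    simp [List.drop_drop]
  · rw [pvBLoop, if_neg h]
    rw [List.drop_eq_nil_of_le (by omega)]
    simp [pvChunkF]

-- joining with ',' when the tail of groups is nonempty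
theorem pvJoin_cons (a : List Char) (L : List (List Char)) (h : L ≠ []) :
    PySem.Chars.join [','] (a :: L) = a ++ ',' :: PySem.Chars.join [','] L := by
  cases L with
  | nil => exact absurd rfl h
  | cons b L' => rw [PySem.Chars.join_cons_cons]; simp

-- core: B's chunking of the reversed prefix, joined and reversed, is A's right-to-left grouping
theorem pvCore (rest : List Char) (h : rest ≠ []) :
    (PySem.Chars.join [','] (pvChunkF rest.reverse)).reverse = pvGroupRight rest := by
  induction rest using pvGroupRight.induct with
  | case1 rest hlen ih =>
    have hfront : rest.take (rest.length - 2) ≠ [] := by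
      apply List.ne_nil_of_length_pos; simp; omega
    rw [pvChunkF_cons _ (by simpa using h)]
    rw [List.take_reverse, List.drop_reverse]
    rw [pvJoin_cons _ _ (pvChunkF_ne_nil _ (by simpa using hfront))]
    rw [pvGroupRight, if_pos hlen, ← ih hfront]
    simp
  | case2 rest hlen =>
    have h2 : rest.length ≤ 2 := by omega
    rw [pvChunkF_cons _ (by simpa using h)]
    rw [List.take_of_length_le (by simpa using h2),
        List.drop_eq_nil_of_le (by simpa using h2), pvChunkF_nil,
        PySem.Chars.join_singleton, List.reverse_reverse, pvGroupRight, if_neg hlen]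

theorem pvMain (amount : Int) :
    format_in_indian_currency amount = format_in_indian_currency_alt amount := by
  unfold format_in_indian_currency format_in_indian_currency_alt
  dsimp only []
  rw [PySem.List.slice_to (PySem.Int.toChars amount).reverse (by omega : (0:Int) ≤ 3), pvBLoop_eq]
  simp only [show ((3:Int).toNat = 3) from rfl]
  by_cases h3 : (PySem.Int.toChars amount).length ≤ 3
  · rw [if_pos h3,
        List.take_of_length_le (by simpa using h3),
        List.drop_eq_nil_of_le (by simpa using h3), pvChunkF_nil]
    simp [PySem.Chars.join_singleton]
  · rw [if_neg h3,
        PySem.List.slice_from_neg_ofNat _ 3 (by omega),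
        PySem.List.slice_to_neg_ofNat _ 3 (by omega),
        List.take_reverse, List.drop_reverse, pvALoop_eq]
    have hrest : (PySem.Int.toChars amount).take ((PySem.Int.toChars amount).length - 3) ≠ [] := by
      apply List.ne_nil_of_length_pos; simp; omega
    rw [show ([((PySem.Int.toChars amount).drop ((PySem.Int.toChars amount).length - 3)).reverse] ++
          pvChunkF ((PySem.Int.toChars amount).take ((PySem.Int.toChars amount).length - 3)).reverse)
        = (((PySem.Int.toChars amount).drop ((PySem.Int.toChars amount).length - 3)).reverse ::
          pvChunkF ((PySem.Int.toChars amount).take ((PySem.Int.toChars amount).length - 3)).reverse) from by simp]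
    rw [pvJoin_cons _ _ (pvChunkF_ne_nil _ (by simpa using hrest))]
    simp [List.reverse_append, pvCore _ hrest]

-- ===== VERDICT (by name: the statement is the Claim_ definition above) =====
theorem format_in_indian_currency_spec : Claim_equal_format_in_indian_currency := by
  intro amount _
  exact pvMain amount
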